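-- pv_equiv track=rewrite | github.com/amirkzemi-spec/nikaweb | backend/bot.py | parse_generate_args
-- ===== SOURCE A (Python) =====
-- def parse_generate_args(args):
--     full = " ".join(args)
--     parts = [p.strip() for p in full.split("|")]
--     result = {"topic": parts[0], "keyword": "", "category": "Immigration", "tone": "professional and trustworthy", "extra_context": ""}
--     for part in parts[1:]:
--         if part.lower().startswith("keyword:"): result["keyword"] = part[8:].strip()
--         elif part.lower().startswith("category:"): result["category"] = part[9:].strip()
--         elif part.lower().startswith("tone:"): result["tone"] = part[5:].strip()
--         elif part.lower().startswith("context:"): result["extra_context"] = part[8:].strip()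
--     return result
-- ===== SOURCE B (Python) =====
-- def _last_value(parts, label, default):
--     # last-match-wins: scan the parts backwards and return at the first hit
--     n = len(label) + 1
--     for part in reversed(parts):
--         if part.lower().startswith(label + ":"):
--             return part[n:].strip()
--     return default
--
-- def parse_generate_args(args):
--     parts = [p.strip() for p in " ".join(args).split("|")]
--     tail = parts[1:]
--     return {
--         "topic": parts[0],
--         "keyword": _last_value(tail, "keyword", ""),
--         "category": _last_value(tail, "category", "Immigration"),
--         "tone": _last_value(tail, "tone", "professional and trustworthy"),
--         "extra_context": _last_value(tail, "context", ""),
--     }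
-- ===== Notes on version B (the rewrite author's own statement) =====
-- stated objective: alternative
-- what changed: Replaces A's single forward pass that mutates a shared result dict through a four-way if/elif chain by building the result dict directly, each of the four option fields computed by its own independent backwards scan that returns at the first (i.e. last-in-order) matching part; correct because the label prefixes are mutually exclusive so per-field last-match equals A's last overwrite.
import Mathlib
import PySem

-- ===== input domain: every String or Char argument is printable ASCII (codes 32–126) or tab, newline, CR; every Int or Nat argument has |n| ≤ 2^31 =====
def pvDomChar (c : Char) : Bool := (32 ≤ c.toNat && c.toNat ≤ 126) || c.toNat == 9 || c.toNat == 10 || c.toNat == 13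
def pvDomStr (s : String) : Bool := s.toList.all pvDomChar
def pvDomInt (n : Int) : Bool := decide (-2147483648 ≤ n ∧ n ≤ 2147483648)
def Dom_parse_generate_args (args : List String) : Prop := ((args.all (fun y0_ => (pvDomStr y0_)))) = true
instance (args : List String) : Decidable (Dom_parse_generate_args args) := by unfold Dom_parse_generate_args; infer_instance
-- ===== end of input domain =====

-- B replaces A's single forward fold with an if/elif chain by FIVE independent passes: the result
-- dict is built directly, each field by its own backwards last-match scan (objective: alternative).
-- Equivalence of the RETURN value is proved; A is total.

-- ===== PORT A =====
-- step of A's for-loop over parts[1:]: the if/elif chain of lower().startswith tests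
def pvStepA (d : PySem.Dict String String) (part : String) : PySem.Dict String String :=
  if PySem.Str.startswith (PySem.Str.lower part) "keyword:" then
    d.insert "keyword" (PySem.Str.strip (PySem.Str.slice part (some 8) none))
  else if PySem.Str.startswith (PySem.Str.lower part) "category:" then
    d.insert "category" (PySem.Str.strip (PySem.Str.slice part (some 9) none))
  else if PySem.Str.startswith (PySem.Str.lower part) "tone:" then
    d.insert "tone" (PySem.Str.strip (PySem.Str.slice part (some 5) none))
  else if PySem.Str.startswith (PySem.Str.lower part) "context:" then
    d.insert "extra_context" (PySem.Str.strip (PySem.Str.slice part (some 8) none))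
  else d

def parse_generate_args (args : List String) : List (String × String) :=
  let full := PySem.Str.join " " args
  -- full.split("|"): sep is the non-empty "|", so split? is always some; .getD [] is a totality guard only
  let parts := ((PySem.Str.split? full "|").getD []).map PySem.Str.strip
  -- parts[0]: parts is never empty (str.split returns ≥ 1 piece); .getD "" is a totality guard only
  let result : PySem.Dict String String :=
    ((((PySem.Dict.empty.insert "topic" ((PySem.List.pyGet? parts 0).getD "")).insert
       "keyword" "").insert "category" "Immigration").insert
       "tone" "professional and trustworthy").insert "extra_context" ""
  ((PySem.List.slice parts (some 1) none).foldl pvStepA result).items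

-- ===== PORT B =====
-- B's helper _last_value: scan the parts BACKWARDS, return at the first hit, default if none
def pvFindLast : List String → String → String → String
  | [], _, default => default
  | part :: rest, label, default =>
    if PySem.Str.startswith (PySem.Str.lower part) (label ++ ":") then
      PySem.Str.strip (PySem.Str.slice part (some (PySem.Str.len label + 1)) none)
    else pvFindLast rest label default

def pvLastValue (parts : List String) (label : String) (default : String) : String :=
  pvFindLast parts.reverse label default

def parse_generate_args_alt (args : List String) : List (String × String) :=
  let parts := ((PySem.Str.split? (PySem.Str.join " " args) "|").getD []).map PySem.Str.strip
  let tail := PySem.List.slice parts (some 1) none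
  [("topic", (PySem.List.pyGet? parts 0).getD ""),
   ("keyword", pvLastValue tail "keyword" ""),
   ("category", pvLastValue tail "category" "Immigration"),
   ("tone", pvLastValue tail "tone" "professional and trustworthy"),
   ("extra_context", pvLastValue tail "context" "")]

-- ===== PRECONDITION & SPEC =====
def Spec_parse_generate_args (args : List String) (out : List (String × String)) : Prop := out = parse_generate_args_alt args
instance (args : List String) (out : List (String × String)) : Decidable (Spec_parse_generate_args args out) := by unfold Spec_parse_generate_args; infer_instance

-- ===== CLAIM =====
def Claim_equal_parse_generate_args : Prop := ∀ (args : List String), Dom_parse_generate_args args → Spec_parse_generate_args args (parse_generate_args args)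

-- ===== LEMMAS AND PROOFS =====

-- proof-side abbreviations for B's match test and extracted value
def pvMatch (part label : String) : Bool :=
  PySem.Str.startswith (PySem.Str.lower part) (label ++ ":")

def pvVal (part label : String) : String :=
  PySem.Str.strip (PySem.Str.slice part (some (PySem.Str.len label + 1)) none)

-- the dict shape A's loop maintains: the five keys in insertion order
def pvD5 (t k c tn x : String) : PySem.Dict String String :=
  ((((PySem.Dict.empty.insert "topic" t).insert "keyword" k).insert "category" c).insert
    "tone" tn).insert "extra_context" x

-- A's step, phrased through pvMatch/pvVal (the labels' slice offsets are len(label)+1)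
lemma pvStepA_eq (d : PySem.Dict String String) (part : String) : pvStepA d part =
    if pvMatch part "keyword" then d.insert "keyword" (pvVal part "keyword")
    else if pvMatch part "category" then d.insert "category" (pvVal part "category")
    else if pvMatch part "tone" then d.insert "tone" (pvVal part "tone")
    else if pvMatch part "context" then d.insert "extra_context" (pvVal part "context")
    else d := rfl

lemma pvFindLast_append (l : List String) (p label d : String) :
    pvFindLast (l ++ [p]) label d
      = pvFindLast l label (if pvMatch p label then pvVal p label else d) := by
  induction l with
  | nil => rfl
  | cons q rest ih =>
    rw [List.cons_append, pvFindLast, pvFindLast]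
    by_cases h : (PySem.Str.startswith (PySem.Str.lower q) (label ++ ":")) = true
    · rw [if_pos h, if_pos h]
    · rw [if_neg h, if_neg h]
      exact ih

lemma pvLast_cons (p : String) (rest : List String) (label d : String) :
    pvLastValue (p :: rest) label d
      = pvLastValue rest label (if pvMatch p label then pvVal p label else d) := by
  unfold pvLastValue
  rw [List.reverse_cons, pvFindLast_append]

-- two incomparable prefixes cannot both start the same list
lemma pvExclC (l A B : List Char) (h : ¬ A <+: B) (h' : ¬ B <+: A) :
    PySem.Chars.startswith l A = true → PySem.Chars.startswith l B = false := by
  intro hA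
  by_contra hB
  rw [Bool.not_eq_false, PySem.Chars.startswith_iff] at hB
  rw [PySem.Chars.startswith_iff] at hA
  rcases List.prefix_or_prefix_of_prefix hA hB with hc | hc
  · exact h hc
  · exact h' hc

lemma pvMatch_false (p P Q : String)
    (hPQ : ¬ ((P ++ ":" : String).toList <+: (Q ++ ":" : String).toList))
    (hQP : ¬ ((Q ++ ":" : String).toList <+: (P ++ ":" : String).toList)) :
    pvMatch p P = true → pvMatch p Q = false := by
  intro h
  have hC := pvExclC (PySem.Chars.lower p.toList) (P ++ ":").toList (Q ++ ":").toList hPQ hQP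
  unfold pvMatch at h ⊢
  rw [PySem.Str.startswith_eq, PySem.Str.toList_lower] at h ⊢
  exact hC h

-- inserting at an existing key of the five-key dict overwrites in place
lemma pvD5_ins_k (t k c tn x v : String) : (pvD5 t k c tn x).insert "keyword" v = pvD5 t v c tn x := rfl
lemma pvD5_ins_c (t k c tn x v : String) : (pvD5 t k c tn x).insert "category" v = pvD5 t k v tn x := rfl
lemma pvD5_ins_t (t k c tn x v : String) : (pvD5 t k c tn x).insert "tone" v = pvD5 t k c v x := rfl
lemma pvD5_ins_x (t k c tn x v : String) : (pvD5 t k c tn x).insert "extra_context" v = pvD5 t k c tn v := rfl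

-- the invariant: folding A's step equals five independent last-match scans
lemma pvFold (ps : List String) : ∀ (k c tn x t : String),
    List.foldl pvStepA (pvD5 t k c tn x) ps
      = pvD5 t (pvLastValue ps "keyword" k) (pvLastValue ps "category" c)
               (pvLastValue ps "tone" tn) (pvLastValue ps "context" x) := by
  induction ps with
  | nil => intro k c tn x t; rfl
  | cons p rest ih =>
    intro k c tn x t
    rw [List.foldl_cons, pvStepA_eq, pvLast_cons, pvLast_cons, pvLast_cons, pvLast_cons]
    by_cases h1 : pvMatch p "keyword" = true
    · have h2 := pvMatch_false p "keyword" "category" (by decide) (by decide) h1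
      have h3 := pvMatch_false p "keyword" "tone" (by decide) (by decide) h1
      have h4 := pvMatch_false p "keyword" "context" (by decide) (by decide) h1
      simp only [h1, h2, h3, h4, if_true, if_false, Bool.false_eq_true]
      rw [pvD5_ins_k]
      exact ih (pvVal p "keyword") c tn x t
    · by_cases h2 : pvMatch p "category" = true
      · have h1' := pvMatch_false p "category" "keyword" (by decide) (by decide) h2
        have h3 := pvMatch_false p "category" "tone" (by decide) (by decide) h2
        have h4 := pvMatch_false p "category" "context" (by decide) (by decide) h2
        simp only [h1', h2, h3, h4, if_true, if_false, Bool.false_eq_true]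
        rw [pvD5_ins_c]
        exact ih k (pvVal p "category") tn x t
      · by_cases h3 : pvMatch p "tone" = true
        · have h1' := pvMatch_false p "tone" "keyword" (by decide) (by decide) h3
          have h2' := pvMatch_false p "tone" "category" (by decide) (by decide) h3
          have h4 := pvMatch_false p "tone" "context" (by decide) (by decide) h3
          simp only [h1', h2', h3, h4, if_true, if_false, Bool.false_eq_true]
          rw [pvD5_ins_t]
          exact ih k c (pvVal p "tone") x t
        · by_cases h4 : pvMatch p "context" = true
          · have h1' := pvMatch_false p "context" "keyword" (by decide) (by decide) h4
            have h2' := pvMatch_false p "context" "category" (by decide) (by decide) h4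
            have h3' := pvMatch_false p "context" "tone" (by decide) (by decide) h4
            simp only [h1', h2', h3', h4, if_true, if_false, Bool.false_eq_true]
            rw [pvD5_ins_x]
            exact ih k c tn (pvVal p "context") t
          · simp only [Bool.not_eq_true] at h1 h2 h3 h4
            simp only [h1, h2, h3, h4, if_false, Bool.false_eq_true]
            exact ih k c tn x t

-- ===== VERDICT =====
theorem parse_generate_args_spec : Claim_equal_parse_generate_args := by
  intro args _
  unfold Spec_parse_generate_args parse_generate_args parse_generate_args_alt
  simp only []
  have h := pvFold
    (PySem.List.slice (List.map PySem.Str.strip ((PySem.Str.split? (PySem.Str.join " " args) "|").getD [])) (some 1) none)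
    "" "Immigration" "professional and trustworthy" ""
    ((PySem.List.pyGet? (List.map PySem.Str.strip ((PySem.Str.split? (PySem.Str.join " " args) "|").getD [])) 0).getD "")
  unfold pvD5 at h
  rw [h]
  rfl
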